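-- pv_equiv track=rewrite | github.com/eekofficial/leetcode | 1170. Compare Strings by Frequency of the Smallest Character.py | min_frequency
-- ===== SOURCE A (Python) =====
-- def min_frequency(word):
--     min_c = word[0]
--     count = 1
--     for i in range(1, len(word)):
--         if word[i] < min_c:
--             min_c = word[i]
--             count = 1
--         elif word[i] == min_c:
--             count += 1
--     return count
-- ===== SOURCE B (Python) =====
-- def min_frequency(word):
--     s = sorted(word)
--     return s.count(s[0])
-- ===== Notes on version B (the rewrite author's own statement) =====
-- stated objective: idiomatic
-- what changed: A's single combined min-tracking-and-count loop (reset/increment state machine) is replaced by sorting the word and counting how often the head of the sorted list occurs.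
import Mathlib
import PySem

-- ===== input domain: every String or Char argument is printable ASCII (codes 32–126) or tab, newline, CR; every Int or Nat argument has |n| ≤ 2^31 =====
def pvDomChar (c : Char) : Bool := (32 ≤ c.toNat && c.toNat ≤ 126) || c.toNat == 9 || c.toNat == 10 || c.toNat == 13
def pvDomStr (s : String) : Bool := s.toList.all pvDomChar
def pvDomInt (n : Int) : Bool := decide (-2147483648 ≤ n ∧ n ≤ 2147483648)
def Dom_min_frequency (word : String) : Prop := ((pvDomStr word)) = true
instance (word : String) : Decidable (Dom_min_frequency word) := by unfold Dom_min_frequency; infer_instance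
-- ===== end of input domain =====

-- B replaces A's single min-tracking-and-count loop by sort-then-count (idiomatic, same result); proved equal on nonempty words (both raise IndexError on "").


-- ===== PORT A =====
-- A's loop body: reset the count on a new strict minimum, bump it on an equal character.
def pvStep (st : Char × Int) (x : Char) : Char × Int :=
  if x < st.1 then (x, (1 : Int))
  else if x == st.1 then (st.1, st.2 + 1)
  else st

-- A: iterating word[1:] is exactly Python's 'for i in range(1, len(word))' reading word[i] in order.
def min_frequency (word : String) : Int :=
  match word.toList with
  | [] => 0   -- unreachable under Pre_ (Python: word[0] raises IndexError)
  | c :: rest => (rest.foldl pvStep (c, (1 : Int))).2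

-- ===== PORT B =====
-- B: s = sorted(word); return s.count(s[0])
def min_frequency_alt (word : String) : Int :=
  match PySem.List.sorted word.toList (fun c => c) with
  | [] => 0   -- unreachable under Pre_ (Python: s[0] raises IndexError)
  | m :: t => ((PySem.List.count (m :: t) m : Nat) : Int)

-- ===== PRECONDITION & SPEC =====
-- Pre_ excludes only the empty string, on which both Pythons raise IndexError.
def Pre_min_frequency (word : String) : Prop := word.toList ≠ []
instance (word : String) : Decidable (Pre_min_frequency word) := by unfold Pre_min_frequency; infer_instance
def pvWitness_min_frequency : String := "abca"

def Spec_min_frequency (word : String) (out : Int) : Prop := out = min_frequency_alt word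
instance (word : String) (out : Int) : Decidable (Spec_min_frequency word out) := by unfold Spec_min_frequency; infer_instance

-- ===== CLAIM (what is proved, stated in full; the proofs are below) =====
def Claim_equal_min_frequency : Prop := ∀ (word : String), Dom_min_frequency word → Pre_min_frequency word → Spec_min_frequency word (min_frequency word)

-- ===== LEMMAS AND PROOFS =====

theorem pv_foldl_min_le (t : List Char) (a : Char) : t.foldl min a ≤ a := by
  induction t generalizing a with
  | nil => simp
  | cons x t ih => exact le_trans (ih (min a x)) (min_le_left a x)

theorem pv_foldl_min_mem (t : List Char) (a : Char) : t.foldl min a ∈ a :: t := by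
  induction t generalizing a with
  | nil => simp
  | cons x t ih =>
    rcases List.mem_cons.mp (ih (min a x)) with h | h
    · rcases min_choice a x with hm | hm
      · simp only [List.foldl_cons]; rw [h, hm]; exact List.mem_cons_self
      · simp only [List.foldl_cons]; rw [h, hm]
        exact List.mem_cons_of_mem _ List.mem_cons_self
    · simp only [List.foldl_cons]
      exact List.mem_cons_of_mem _ (List.mem_cons_of_mem _ h)

theorem pv_foldl_min_le_mem (t : List Char) (a : Char) (y : Char) (hy : y ∈ t) :
    t.foldl min a ≤ y := by
  induction t generalizing a with
  | nil => cases hy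
  | cons x t ih =>
    simp only [List.foldl_cons]
    rcases List.mem_cons.mp hy with h | h
    · rw [h]; exact le_trans (pv_foldl_min_le t (min a x)) (min_le_right a x)
    · exact ih (min a x) h

-- A's loop computes the running minimum and the count of its occurrences.
theorem pvA_fold (t : List Char) (m : Char) (k : Int) :
    t.foldl pvStep (m, k)
    = (t.foldl min m,
       if t.foldl min m = m then k + (List.count m t : Int)
       else (List.count (t.foldl min m) t : Int)) := by
  induction t generalizing m k with
  | nil => simp
  | cons x t ih =>
    simp only [List.foldl_cons]
    by_cases hlt : x < m
    · have hstep : pvStep (m, k) x = (x, 1) := by simp [pvStep, hlt]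
      rw [hstep, ih x 1, min_eq_right hlt.le]
      have hne : t.foldl min x ≠ m := by
        intro h; exact absurd (h ▸ pv_foldl_min_le t x) (not_le.mpr hlt)
      rw [if_neg hne]
      by_cases hx : t.foldl min x = x
      · rw [if_pos hx, hx]
        have : List.count x (x :: t) = List.count x t + 1 := by simp
        rw [this]; push_cast; ring
      · rw [if_neg hx]
        have : List.count (t.foldl min x) (x :: t) = List.count (t.foldl min x) t := by
          simp [List.count_cons]
          exact fun h => hx h.symm
        rw [this]
    · by_cases heq : x = m
      · subst heq
        have hstep : pvStep (x, k) x = (x, k + 1) := by simp [pvStep]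
        rw [hstep, ih x (k + 1), min_self]
        by_cases hm : t.foldl min x = x
        · rw [if_pos hm, if_pos hm]
          have : List.count x (x :: t) = List.count x t + 1 := by simp
          rw [this]; push_cast; ring
        · rw [if_neg hm, if_neg hm]
          have : List.count (t.foldl min x) (x :: t) = List.count (t.foldl min x) t := by
            simp [List.count_cons]
            exact fun h => hm h.symm
          rw [this]
      · have hstep : pvStep (m, k) x = (m, k) := by simp [pvStep, hlt, heq]
        rw [hstep, ih m k, min_eq_left (le_of_not_gt hlt)]
        have hmx : m < x := lt_of_le_of_ne (le_of_not_gt hlt) (fun h => heq h.symm)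
        have hne2 : t.foldl min m ≠ x := by
          intro h
          exact absurd (h ▸ pv_foldl_min_le t m) (not_le.mpr hmx)
        have c1 : List.count m (x :: t) = List.count m t := by
          simp [heq]
        have c2 : List.count (t.foldl min m) (x :: t) = List.count (t.foldl min m) t := by
          simp [List.count_cons]
          exact fun h => hne2 h.symm
        rw [c1, c2]

-- head of sorted(l) is the running minimum of l
theorem pv_sorted_head (c : Char) (rest : List Char) (m : Char) (t : List Char)
    (h : PySem.List.sorted (c :: rest) (fun x => x) = m :: t) :
    m = rest.foldl min c := by
  have hperm := PySem.List.sorted_perm (c :: rest) (fun x => x) false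
  rw [h] at hperm
  have hmmem : m ∈ c :: rest := hperm.mem_iff.mp List.mem_cons_self
  have hmle : ∀ y ∈ c :: rest, m ≤ y :=
    PySem.List.key_head_sorted_le (c :: rest) (fun x => x) h
  have h1 : m ≤ rest.foldl min c := hmle _ (pv_foldl_min_mem rest c)
  have h2 : rest.foldl min c ≤ m := by
    rcases List.mem_cons.mp hmmem with hh | hh
    · exact hh ▸ pv_foldl_min_le rest c
    · exact pv_foldl_min_le_mem rest c m hh
  exact le_antisymm h1 h2

-- ===== VERDICT (by name: the statement is the Claim_ definition above) =====
theorem min_frequency_spec : Claim_equal_min_frequency := by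
  intro word _ hpre
  unfold Spec_min_frequency
  cases hl : word.toList with
  | nil => exact absurd hl hpre
  | cons c rest =>
    have hsne : PySem.List.sorted (c :: rest) (fun x => x) ≠ [] := by
      intro h
      exact (List.cons_ne_nil c rest) ((PySem.List.sorted_eq_nil_iff _ _ _).mp h)
    cases hs : PySem.List.sorted (c :: rest) (fun x => x) with
    | nil => exact absurd hs hsne
    | cons m t =>
      have hA : min_frequency word = (rest.foldl pvStep (c, 1)).2 := by
        unfold min_frequency; rw [hl]
      have hB : min_frequency_alt word = ((List.count m (m :: t) : Nat) : Int) := by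
        unfold min_frequency_alt
        rw [hl, hs]
        simp [PySem.List.count_eq]
      have hperm := PySem.List.sorted_perm (c :: rest) (fun x => x) false
      rw [hs] at hperm
      have hm : m = rest.foldl min c := pv_sorted_head c rest m t hs
      rw [hA, hB, pvA_fold]
      have hcount : List.count m (m :: t) = List.count m (c :: rest) := hperm.count_eq m
      rw [hcount, hm]
      by_cases hMc : rest.foldl min c = c
      · rw [if_pos hMc, hMc]
        have : List.count c (c :: rest) = List.count c rest + 1 := by simp
        rw [this]; push_cast; ring
      · rw [if_neg hMc]
        have : List.count (rest.foldl min c) (c :: rest) = List.count (rest.foldl min c) rest := by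
          simp [List.count_cons]
          exact fun h => hMc h.symm
        rw [this]
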